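-- pv_equiv track=rewrite | github.com/cjhcjh123-666/RPS | seg/models/backbones/repvit.py | _is_critical_for_compression
-- ===== SOURCE A (Python) =====
-- def _is_critical_for_compression(layer_idx: int, dropped_layers: set) -> bool:
--     """判断某层是否因压缩而变为关键层，需要增强LoRA"""
--     if not dropped_layers:
--         return False
--
--     # 相邻层被丢弃的层需要增强
--     for dropped_idx in dropped_layers:
--         if abs(layer_idx - dropped_idx) <= 2:  # 2层范围内
--             return True
--
--     # 在256通道段且有层被丢弃的情况下，所有256通道层都需要增强
--     if 9 <= layer_idx <= 21:  # 256通道段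
--         return bool(dropped_layers.intersection(range(9, 22)))
--
--     return False
-- ===== SOURCE B (Python) =====
-- def _is_critical_for_compression(layer_idx: int, dropped_layers: set) -> bool:
--     # Sort the dropped indices once and answer both questions as range-count
--     # queries [a, b) using a binary-search rank function count_lt(x) =
--     # number of dropped indices < x.
--     s = sorted(dropped_layers)
--
--     def count_lt(x):
--         lo, hi = 0, len(s)
--         while lo < hi:
--             mid = (lo + hi) // 2
--             if s[mid] < x:
--                 lo = mid + 1
--             else:
--                 hi = mid
--         return lo
--
--     # an index within distance 2 of layer_idx <=> some dropped in [idx-2, idx+3)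
--     if count_lt(layer_idx + 3) - count_lt(layer_idx - 2) > 0:
--         return True
--     # 256-channel segment: some dropped index in [9, 22)
--     return 9 <= layer_idx <= 21 and count_lt(22) - count_lt(9) > 0
-- ===== Notes on version B (the rewrite author's own statement) =====
-- stated objective: alternative
-- what changed: B sorts the dropped set once and answers both the proximity question and the 256-segment question as range-count queries [a,b) through a single binary-search rank function count_lt, instead of A's linear scans over the set (loop with abs, and set.intersection).
import Mathlib
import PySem

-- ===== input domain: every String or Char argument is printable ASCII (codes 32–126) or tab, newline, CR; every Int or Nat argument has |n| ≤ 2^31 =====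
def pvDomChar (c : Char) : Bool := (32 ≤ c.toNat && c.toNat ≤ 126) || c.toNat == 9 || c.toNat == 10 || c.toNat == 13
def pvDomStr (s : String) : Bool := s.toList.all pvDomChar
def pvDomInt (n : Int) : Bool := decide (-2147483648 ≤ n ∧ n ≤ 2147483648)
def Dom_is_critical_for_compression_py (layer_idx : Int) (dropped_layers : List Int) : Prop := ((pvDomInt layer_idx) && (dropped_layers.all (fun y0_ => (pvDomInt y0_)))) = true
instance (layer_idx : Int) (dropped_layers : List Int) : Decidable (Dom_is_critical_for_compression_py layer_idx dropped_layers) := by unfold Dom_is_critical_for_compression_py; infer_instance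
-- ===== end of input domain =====

-- B sorts the dropped set once and answers both checks as binary-search range-count queries (alternative algorithm, same result).


-- ===== PORT A =====
-- Port of A: early empty return, loop over the dropped set testing |layer_idx - d| <= 2,
-- then bool(dropped_layers.intersection(range(9,22))) as a nonempty filter of the set.
def is_critical_for_compression_py (layer_idx : Int) (dropped_layers : List Int) : Bool :=
  if dropped_layers = [] then false
  else if dropped_layers.any (fun d => decide (|layer_idx - d| ≤ 2)) then true
  else if 9 ≤ layer_idx ∧ layer_idx ≤ 21 then
    !((dropped_layers.filter (fun d => decide (9 ≤ d ∧ d ≤ 21))).isEmpty)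
  else false

-- ===== PORT B =====
-- count_lt's while loop as the obvious structural recursion on hi - lo; s[mid] is always
-- in range in the Python (0 ≤ lo ≤ mid < hi ≤ len s), so getD with default 0 is exact.
def pvCountLtLoop (s : List Int) (x : Int) (lo hi : Nat) : Nat :=
  if lo < hi then
    let mid := (lo + hi) / 2
    if s.getD mid 0 < x then pvCountLtLoop s x (mid + 1) hi
    else pvCountLtLoop s x lo mid
  else lo
termination_by hi - lo
decreasing_by all_goals omega

-- Port of B: sort once, then two range-count queries via the binary-search rank function.
def is_critical_for_compression_py_alt (layer_idx : Int) (dropped_layers : List Int) : Bool :=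
  let s := PySem.List.sorted dropped_layers (fun d => d) false
  let countLt := fun (x : Int) => pvCountLtLoop s x 0 s.length
  if ((countLt (layer_idx + 3) : Int) - (countLt (layer_idx - 2) : Int)) > 0 then true
  else decide (9 ≤ layer_idx) && decide (layer_idx ≤ 21) &&
       decide (((countLt 22 : Int) - (countLt 9 : Int)) > 0)

-- ===== PRECONDITION & SPEC =====
def Spec_is_critical_for_compression_py (layer_idx : Int) (dropped_layers : List Int) (out : Bool) : Prop := out = is_critical_for_compression_py_alt layer_idx dropped_layers
instance (layer_idx : Int) (dropped_layers : List Int) (out : Bool) : Decidable (Spec_is_critical_for_compression_py layer_idx dropped_layers out) := by unfold Spec_is_critical_for_compression_py; infer_instance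

-- ===== CLAIM (what is proved, stated in full; the proofs are below) =====
def Claim_equal_is_critical_for_compression_py : Prop := ∀ (layer_idx : Int) (dropped_layers : List Int), Dom_is_critical_for_compression_py layer_idx dropped_layers → Spec_is_critical_for_compression_py layer_idx dropped_layers (is_critical_for_compression_py layer_idx dropped_layers)

-- ===== LEMMAS AND PROOFS =====

-- Binary-search invariant: starting from a split state (everything below lo is < x,
-- everything from hi on is ≥ x) on a sorted list, the loop returns a full split point.
theorem pvCountLtLoop_spec (s : List Int) (x : Int)
    (hs : s.Pairwise (· ≤ ·)) :
    ∀ (n lo hi : Nat), hi - lo = n → lo ≤ hi → hi ≤ s.length →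
    (∀ i, i < lo → s.getD i 0 < x) →
    (∀ i, hi ≤ i → i < s.length → ¬ s.getD i 0 < x) →
    (pvCountLtLoop s x lo hi ≤ s.length ∧
     (∀ i, i < pvCountLtLoop s x lo hi → s.getD i 0 < x) ∧
     (∀ i, pvCountLtLoop s x lo hi ≤ i → i < s.length → ¬ s.getD i 0 < x)) := by
  intro n
  induction n using Nat.strong_induction_on with
  | _ n ih =>
    intro lo hi hn hlohi hhi hbelow habove
    rw [pvCountLtLoop]
    by_cases h : lo < hi
    · simp only [h, if_true]
      have hmidlt : (lo + hi) / 2 < hi := by omega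
      have hmids : (lo + hi) / 2 < s.length := by omega
      have hmono : ∀ p q, p ≤ q → q < s.length → s.getD p 0 ≤ s.getD q 0 := by
        intro p q hpq hq
        rcases Nat.eq_or_lt_of_le hpq with rfl | hlt
        · exact le_refl _
        · have := (List.pairwise_iff_getElem).mp hs p q (by omega) hq hlt
          simpa [List.getD_eq_getElem?_getD, List.getElem?_eq_getElem,
                 (by omega : p < s.length), hq] using this
      by_cases hm : s.getD ((lo + hi) / 2) 0 < x
      · simp only [hm, if_true]
        exact ih (hi - ((lo + hi) / 2 + 1)) (by omega) _ _ rfl (by omega) hhi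
          (fun i hi2 => lt_of_le_of_lt (hmono i ((lo + hi) / 2) (by omega) hmids) hm)
          habove
      · simp only [hm, if_false]
        exact ih ((lo + hi) / 2 - lo) (by omega) _ _ rfl (by omega) (by omega)
          hbelow
          (fun i hi2 hi3 hlt => hm (lt_of_le_of_lt (hmono ((lo + hi) / 2) i hi2 hi3) hlt))
    · simp only [h, if_false]
      have : lo = hi := by omega
      subst this
      exact ⟨by omega, hbelow, habove⟩

-- A full split point equals the count of elements < x.
theorem countP_of_split (x : Int) :
    ∀ (s : List Int) (r : Nat), r ≤ s.length →
    (∀ i, i < r → s.getD i 0 < x) →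
    (∀ i, r ≤ i → i < s.length → ¬ s.getD i 0 < x) →
    s.countP (fun d => decide (d < x)) = r := by
  intro s
  induction s with
  | nil =>
    intro r hr _ _
    simp only [List.length_nil, Nat.le_zero] at hr
    subst hr; simp
  | cons a t iht =>
    intro r hr hlt hge
    cases r with
    | zero =>
      have h0 : ¬ a < x := by simpa using hge 0 (by omega) (by simp)
      have ht : t.countP (fun d => decide (d < x)) = 0 := by
        apply iht 0 (by omega) (by omega)
        intro i _ hi
        simpa [List.getD_cons_succ] using hge (i + 1) (by omega) (by simp; omega)
      simp [ht, h0]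
    | succ k =>
      have ha : a < x := by simpa using hlt 0 (by omega)
      have ht : t.countP (fun d => decide (d < x)) = k := by
        apply iht k (by simpa using hr)
        · intro i hi
          simpa [List.getD_cons_succ] using hlt (i + 1) (by omega)
        · intro i hi hi2
          simpa [List.getD_cons_succ] using hge (i + 1) (by omega) (by simp; omega)
      simp [ht, ha]

-- The rank function on the sorted copy counts the original elements below x.
theorem pvCountLt_sorted (ds : List Int) (x : Int) :
    pvCountLtLoop (PySem.List.sorted ds (fun d => d) false) x 0
        (PySem.List.sorted ds (fun d => d) false).length
      = ds.countP (fun d => decide (d < x)) := by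
  have hs : (PySem.List.sorted ds (fun d => d) false).Pairwise (· ≤ ·) := by
    simpa using PySem.List.sorted_pairwise ds (fun d => d)
  obtain ⟨h1, h2, h3⟩ := pvCountLtLoop_spec _ x hs _ 0 _ rfl (by omega) (le_refl _)
    (by omega) (by intro i h hi; omega)
  rw [← countP_of_split x _ _ h1 h2 h3]
  exact (PySem.List.sorted_perm ds (fun d => d) false).countP_eq _

-- countP (< b) = countP (< a) + countP (a ≤ · < b), for a ≤ b.
theorem countP_lt_split (a b : Int) (hab : a ≤ b) :
    ∀ (s : List Int), s.countP (fun d => decide (d < b)) =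
      s.countP (fun d => decide (d < a)) + s.countP (fun d => decide (a ≤ d) && decide (d < b)) := by
  intro s
  induction s with
  | nil => simp
  | cons c t iht =>
    simp only [List.countP_cons, iht]
    by_cases h1 : c < a <;> by_cases h2 : c < b <;> by_cases h3 : a ≤ c <;>
      simp [h1, h2, h3] <;> omega

-- The rank-difference test answers the range query ∃ d ∈ ds, a ≤ d < b.
theorem range_pos_iff (ds : List Int) (a b : Int) (hab : a ≤ b) :
    ((ds.countP (fun d => decide (d < b)) : Int) - (ds.countP (fun d => decide (d < a)) : Int) > 0)
      ↔ ∃ d ∈ ds, a ≤ d ∧ d < b := by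
  rw [countP_lt_split a b hab ds]
  push_cast
  rw [show ∀ (p q : Int), p + q - p > 0 ↔ 0 < q from fun p q => by omega]
  norm_cast
  rw [List.countP_pos_iff]
  simp

theorem a_eq_true_iff (x : Int) (ds : List Int) :
    is_critical_for_compression_py x ds = true ↔
      ((∃ d ∈ ds, x - 2 ≤ d ∧ d < x + 3) ∨ (9 ≤ x ∧ x ≤ 21 ∧ ∃ d ∈ ds, 9 ≤ d ∧ d < 22)) := by
  unfold is_critical_for_compression_py
  split_ifs with h0 h1 h2
  · subst h0; simp
  · simp only [List.any_eq_true, decide_eq_true_eq, abs_le] at h1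
    obtain ⟨d, hd, hdd⟩ := h1
    simp only [true_iff]
    exact Or.inl ⟨d, hd, by omega, by omega⟩
  · simp only [List.any_eq_true, decide_eq_true_eq, abs_le, not_exists, not_and] at h1
    constructor
    · intro h
      have hne : List.filter (fun d => decide (9 ≤ d ∧ d ≤ 21)) ds ≠ [] := by
        intro hnil; rw [hnil] at h; simp at h
      obtain ⟨d, hd⟩ := List.exists_mem_of_ne_nil _ hne
      rw [List.mem_filter] at hd
      obtain ⟨hd1, hd2⟩ := hd
      simp only [decide_eq_true_eq] at hd2
      exact Or.inr ⟨h2.1, h2.2, d, hd1, hd2.1, by omega⟩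
    · rintro (⟨d, hd, hdd⟩ | ⟨_, _, d, hd, hdd⟩)
      · exact absurd (by omega : x - d ≤ 2) (h1 d hd (by omega))
      · have hmem : d ∈ List.filter (fun d => decide (9 ≤ d ∧ d ≤ 21)) ds :=
          List.mem_filter.mpr ⟨hd, by simp; omega⟩
        cases hfe : (List.filter (fun d => decide (9 ≤ d ∧ d ≤ 21)) ds).isEmpty with
        | false => simp
        | true =>
          rw [List.isEmpty_iff] at hfe
          rw [hfe] at hmem
          simp at hmem
  · simp only [false_iff, not_or]
    refine ⟨?_, ?_⟩
    · rintro ⟨d, hd, hdd⟩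
      simp only [List.any_eq_true, decide_eq_true_eq, abs_le, not_exists, not_and] at h1
      exact h1 d hd (by omega) (by omega)
    · rintro ⟨hx1, hx2, _⟩
      exact h2 ⟨hx1, hx2⟩

theorem b_eq_true_iff (x : Int) (ds : List Int) :
    is_critical_for_compression_py_alt x ds = true ↔
      ((∃ d ∈ ds, x - 2 ≤ d ∧ d < x + 3) ∨ (9 ≤ x ∧ x ≤ 21 ∧ ∃ d ∈ ds, 9 ≤ d ∧ d < 22)) := by
  unfold is_critical_for_compression_py_alt
  simp only [pvCountLt_sorted]
  by_cases hc1 : ((ds.countP (fun d => decide (d < x + 3)) : Int)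
      - (ds.countP (fun d => decide (d < x - 2)) : Int) > 0)
  · rw [if_pos hc1]
    simp only [true_iff]
    exact Or.inl ((range_pos_iff ds (x - 2) (x + 3) (by omega)).mp hc1)
  · rw [if_neg hc1]
    rw [range_pos_iff ds (x - 2) (x + 3) (by omega)] at hc1
    simp only [Bool.and_eq_true, decide_eq_true_eq]
    rw [range_pos_iff ds 9 22 (by omega)]
    constructor
    · rintro ⟨⟨hx1, hx2⟩, hP⟩
      exact Or.inr ⟨hx1, hx2, hP⟩
    · rintro (h | ⟨hx1, hx2, hP⟩)
      · exact absurd h hc1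
      · exact ⟨⟨hx1, hx2⟩, hP⟩

-- ===== VERDICT (by name: the statement is the Claim_ definition above) =====
theorem is_critical_for_compression_py_spec : Claim_equal_is_critical_for_compression_py := by
  intro x ds _
  unfold Spec_is_critical_for_compression_py
  rw [Bool.eq_iff_iff, a_eq_true_iff, b_eq_true_iff]
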